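-- pv_equiv track=rewrite | github.com/ntflix/sasppu | include/private/sasppu/font/export_font.py | compress_image
-- ===== SOURCE A (Python) =====
-- def compress_image(data, bitdepth):
--     rolling_result = 0
--     output = []
--     for bits in data:
--         bits &= (1 << bitdepth) - 1
--         if bits < rolling_result:
--             next = bits + (1 << bitdepth) - rolling_result
--         else:
--             next = bits - rolling_result
--         output.append(next)
--         rolling_result += bits
--         rolling_result &= (1 << bitdepth) - 1
--     return output
-- ===== SOURCE B (Python) =====
-- def compress_image(data, bitdepth):
--     masked = [b & ((1 << bitdepth) - 1) for b in data]
--     prefixes = [0]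
--     for x in masked:
--         prefixes.append(prefixes[-1] + x)
--     return [(mi - pi) % (1 << bitdepth) for mi, pi in zip(masked, prefixes)]
-- ===== Notes on version B (the rewrite author's own statement) =====
-- stated objective: alternative
-- what changed: Replaces the single rolling-accumulator loop with carry-branch by a two-pass structure: mask all values, build an exclusive prefix-sum table, then combine elementwise with (mi - pi) % (1 << bitdepth), relying on mod distributing over the running sum.
import Mathlib
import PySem

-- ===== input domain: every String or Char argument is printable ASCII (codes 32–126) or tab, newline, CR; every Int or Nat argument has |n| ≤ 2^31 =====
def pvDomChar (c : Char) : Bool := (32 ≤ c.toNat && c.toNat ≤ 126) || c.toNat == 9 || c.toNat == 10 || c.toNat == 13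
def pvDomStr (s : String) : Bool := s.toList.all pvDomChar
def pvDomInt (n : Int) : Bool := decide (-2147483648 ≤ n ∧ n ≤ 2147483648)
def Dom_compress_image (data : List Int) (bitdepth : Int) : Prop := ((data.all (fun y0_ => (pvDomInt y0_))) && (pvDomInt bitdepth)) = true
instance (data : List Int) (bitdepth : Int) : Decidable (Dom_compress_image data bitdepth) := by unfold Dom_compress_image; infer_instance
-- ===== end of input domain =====

-- B replaces A's rolling-accumulator loop (with an explicit carry branch) by a two-pass
-- structure: mask the data, build an exclusive prefix-sum table, then combine with mod.

-- ===== PORT A =====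
-- the for-loop over data with state (rolling_result, output); output built by cons
def pvALoop (bitdepth : Int) (rolling : Int) (data : List Int) : List Int :=
  match data with
  | [] => []
  | b :: rest =>
    let bits := PySem.Int.band b (((1 : Int) <<< bitdepth.toNat) - 1)
    let next := if bits < rolling then bits + ((1 : Int) <<< bitdepth.toNat) - rolling else bits - rolling
    next :: pvALoop bitdepth (PySem.Int.band (rolling + bits) (((1 : Int) <<< bitdepth.toNat) - 1)) rest

def compress_image (data : List Int) (bitdepth : Int) : List Int :=
  pvALoop bitdepth 0 data

-- ===== PORT B =====
-- the 'prefixes' accumulation loop of Source B: prefixes[-1] is the accumulator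
def pvBScan (acc : Int) (m : List Int) : List Int :=
  match m with
  | [] => [acc]
  | x :: rest => acc :: pvBScan (acc + x) rest

def compress_image_alt (data : List Int) (bitdepth : Int) : List Int :=
  let masked := data.map (fun b => PySem.Int.band b (((1 : Int) <<< bitdepth.toNat) - 1))
  let prefixes := pvBScan 0 masked
  (masked.zip prefixes).map (fun p => PySem.Int.mod (p.1 - p.2) ((1 : Int) <<< bitdepth.toNat))

-- ===== PRECONDITION & SPEC =====
-- Pre_ excludes nonempty data with negative bitdepth: there '1 << bitdepth' raises ValueError in A (and in B).
def Pre_compress_image (data : List Int) (bitdepth : Int) : Prop := data = [] ∨ 0 ≤ bitdepth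
instance (data : List Int) (bitdepth : Int) : Decidable (Pre_compress_image data bitdepth) := by unfold Pre_compress_image; infer_instance
def pvWitness_compress_image : List Int × Int := ([5, 3, 200, -7], 8)

def Spec_compress_image (data : List Int) (bitdepth : Int) (out : List Int) : Prop := out = compress_image_alt data bitdepth
instance (data : List Int) (bitdepth : Int) (out : List Int) : Decidable (Spec_compress_image data bitdepth out) := by unfold Spec_compress_image; infer_instance

-- ===== CLAIM (what is proved, stated in full; the proofs are below) =====
def Claim_equal_compress_image : Prop := ∀ (data : List Int) (bitdepth : Int), Dom_compress_image data bitdepth → Pre_compress_image data bitdepth → Spec_compress_image data bitdepth (compress_image data bitdepth)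

-- ===== LEMMAS AND PROOFS =====

theorem pv_shift_eq (d : Nat) : ((1 : Int) <<< d) = 2 ^ d := by
  simp [Int.shiftLeft_eq]

-- masking with 2^d - 1 is reduction mod 2^d, for every integer (Python two's-complement &)
theorem pv_band_mask (x : Int) (d : Nat) :
    PySem.Int.band x ((2 : Int) ^ d - 1) = x % 2 ^ d := by
  have hM : (0 : Int) < 2 ^ d := by positivity
  cases x with
  | ofNat n =>
    rw [show ((Int.ofNat n) = (n : Int)) from rfl,
        PySem.Int.band_of_nonneg (by exact_mod_cast Nat.zero_le n) (by omega)]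
    have ht : ((2 : Int) ^ d - 1).toNat = 2 ^ d - 1 := by
      have : ((2 : Int) ^ d) = ((2 ^ d : Nat) : Int) := by push_cast; ring
      omega
    rw [Int.toNat_natCast, ht, Nat.and_two_pow_sub_one_eq_mod]
    have : ((2 : Int) ^ d) = ((2 ^ d : Nat) : Int) := by push_cast; ring
    rw [this]; push_cast; rfl
  | negSucc n =>
    have hneg : ¬ (0 : Int) ≤ Int.negSucc n := by
      simp [Int.negSucc_eq]; omega
    unfold PySem.Int.band
    rw [if_neg hneg, if_pos (by omega)]
    have harg : (-(Int.negSucc n) - 1) = (n : Int) := by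
      rw [Int.negSucc_eq]; ring
    have ht : ((2 : Int) ^ d - 1).toNat = 2 ^ d - 1 := by
      have : ((2 : Int) ^ d) = ((2 ^ d : Nat) : Int) := by push_cast; ring
      omega
    rw [harg, ht, Int.toNat_natCast, Nat.and_comm, Nat.and_two_pow_sub_one_eq_mod]
    -- goal: ↑(2^d - 1 - n % 2^d) = negSucc n % 2^d
    have hMn : ((2 : Int) ^ d) = ((2 ^ d : Nat) : Int) := by push_cast; ring
    have hr : n % 2 ^ d < 2 ^ d := Nat.mod_lt _ (by positivity)
    have hdecomp : (Int.negSucc n) =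
        ((2 : Int) ^ d - 1 - ((n % 2 ^ d : Nat) : Int)) + 2 ^ d * (-(((n / 2 ^ d : Nat) : Int)) - 1) := by
      have hcast : ((n : Int)) = (2 : Int) ^ d * ((n / 2 ^ d : Nat) : Int) + ((n % 2 ^ d : Nat) : Int) := by
        have h0 := (Nat.div_add_mod n (2 ^ d)).symm
        exact_mod_cast congrArg (Nat.cast : Nat → Int) h0
      simp only [Int.negSucc_eq]
      linear_combination -hcast
    rw [show Int.negSucc n % 2 ^ d =
          (((2 : Int) ^ d - 1 - ((n % 2 ^ d : Nat) : Int)) + 2 ^ d * (-(((n / 2 ^ d : Nat) : Int)) - 1)) % 2 ^ d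
        from by rw [← hdecomp],
        Int.add_mul_emod_self_left,
        Int.emod_eq_of_lt (by omega) (by omega)]
    omega

-- the loop with rolling = p % 2^d computes exactly B's combine pass over the scan from p
theorem pv_loop_eq (bd : Int) (data : List Int) : ∀ (p : Int), 0 ≤ p →
    pvALoop bd (p % 2 ^ bd.toNat) data =
      ((data.map (fun b => PySem.Int.band b (((1 : Int) <<< bd.toNat) - 1))).zip
        (pvBScan p (data.map (fun b => PySem.Int.band b (((1 : Int) <<< bd.toNat) - 1))))).map
        (fun q => PySem.Int.mod (q.1 - q.2) ((1 : Int) <<< bd.toNat)) := by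
  induction data with
  | nil => intro p _; simp [pvALoop, pvBScan]
  | cons b rest ih =>
    intro p hp
    set d := bd.toNat with hd
    have hM : (0 : Int) < 2 ^ d := by positivity
    have hsh : ((1 : Int) <<< d) = 2 ^ d := pv_shift_eq d
    have hbits : PySem.Int.band b (((1 : Int) <<< d) - 1) = b % 2 ^ d := by
      rw [hsh]; exact pv_band_mask b d
    have hbits0 : 0 ≤ b % 2 ^ d := Int.emod_nonneg b (by omega)
    have hbitsM : b % 2 ^ d < 2 ^ d := Int.emod_lt_of_pos b hM
    have hr0 : 0 ≤ p % 2 ^ d := Int.emod_nonneg p (by omega)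
    have hrM : p % 2 ^ d < 2 ^ d := Int.emod_lt_of_pos p hM
    simp only [pvALoop, pvBScan, List.map_cons, List.zip_cons_cons, List.map]
    refine List.cons_eq_cons.mpr ⟨?_, ?_⟩
    · -- head: A's branch equals (bits - p) mod M
      rw [hbits, PySem.Int.mod_eq_emod_of_pos (by rw [hsh]; exact hM), hsh]
      have hsub : (b % 2 ^ d - p) % 2 ^ d = (b % 2 ^ d - p % 2 ^ d) % 2 ^ d := by
        rw [Int.sub_emod, Int.emod_emod_of_dvd _ dvd_rfl, ← Int.sub_emod]
      rw [hsub]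
      by_cases hlt : b % 2 ^ d < p % 2 ^ d
      · rw [if_pos hlt,
            show (b % 2 ^ d - p % 2 ^ d) % 2 ^ d =
              ((b % 2 ^ d - p % 2 ^ d + 2 ^ d) + 2 ^ d * (-1)) % 2 ^ d from by ring_nf,
            Int.add_mul_emod_self_left,
            show (b % 2 ^ d - p % 2 ^ d + 2 ^ d) % 2 ^ d = b % 2 ^ d - p % 2 ^ d + 2 ^ d from
              Int.emod_eq_of_lt (by omega) (by omega)]
        ring
      · rw [if_neg hlt,
            show (b % 2 ^ d - p % 2 ^ d) % 2 ^ d = b % 2 ^ d - p % 2 ^ d from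
              Int.emod_eq_of_lt (by omega) (by omega)]
    · -- tail: new rolling is (p + bits) % M; apply IH at p + bits
      have hroll : PySem.Int.band (p % 2 ^ d + PySem.Int.band b (((1 : Int) <<< d) - 1))
            (((1 : Int) <<< d) - 1) = (p + b % 2 ^ d) % 2 ^ d := by
        rw [hbits, hsh, pv_band_mask, Int.emod_add_emod]
      rw [hroll, ← hbits]
      exact ih (p + PySem.Int.band b (((1 : Int) <<< d) - 1))
        (by rw [hbits]; omega)

-- ===== VERDICT (by name: the statement is the Claim_ definition above) =====
theorem compress_image_spec : Claim_equal_compress_image := by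
  intro data bitdepth _ _
  unfold Spec_compress_image compress_image compress_image_alt
  have h := pv_loop_eq bitdepth data 0 le_rfl
  rw [Int.zero_emod] at h
  simpa using h
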